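-- pv_equiv track=rewrite | github.com/antonioclim/CODEPROBE_PROJECTS | engine.py | blank_runs_from_lines
-- ===== SOURCE A (Python) =====
-- from typing import Any, Dict, Iterable, List, Optional, Sequence, Set, Tuple, Type
--
-- def blank_runs_from_lines(lines: Sequence[str]) -> List[int]:
--     runs: List[int] = []
--     current = 0
--     seen_non_blank = False
--     for line in lines:
--         if line.strip():
--             if seen_non_blank and current > 0:
--                 runs.append(current)
--             current = 0
--             seen_non_blank = True
--         else:
--             current += 1
--     return runs
-- ===== SOURCE B (Python) =====
-- from typing import List, Sequence
--
-- def blank_runs_from_lines(lines: Sequence[str]) -> List[int]: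
--     idx = [i for i, line in enumerate(lines) if line.strip()]
--     runs: List[int] = []
--     for i, j in zip(idx, idx[1:]):
--         gap = j - i - 1
--         if gap > 0:
--             runs.append(gap)
--     return runs
-- ===== Notes on version B (the rewrite author's own statement) =====
-- stated objective: alternative
-- what changed: Replaces A's stateful scan (current counter + seen flag) by collecting the indices of non-blank lines and emitting the positive gaps between consecutive indices.
import Mathlib
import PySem

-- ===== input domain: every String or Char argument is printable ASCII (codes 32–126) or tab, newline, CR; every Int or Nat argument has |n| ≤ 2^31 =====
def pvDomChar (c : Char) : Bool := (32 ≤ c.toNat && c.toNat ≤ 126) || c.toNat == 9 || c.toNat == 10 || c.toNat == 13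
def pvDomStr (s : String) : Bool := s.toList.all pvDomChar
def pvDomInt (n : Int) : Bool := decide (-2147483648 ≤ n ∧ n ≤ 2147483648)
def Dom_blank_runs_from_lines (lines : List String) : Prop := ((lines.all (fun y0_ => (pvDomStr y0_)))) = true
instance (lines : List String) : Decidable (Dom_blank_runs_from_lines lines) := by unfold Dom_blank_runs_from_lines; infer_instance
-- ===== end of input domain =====

-- B replaces A's three-variable scan with index pairing: collect the indices of
-- non-blank lines, then emit positive gaps between consecutive indices (objective: alternative).

-- ===== PORT A =====
def blank_runs_from_lines (lines : List String) : List Int :=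
  (lines.foldl
    (fun (st : List Int × Int × Bool) line =>
      if PySem.Str.strip line ≠ "" then
        ((if st.2.2 = true ∧ st.2.1 > 0 then st.1 ++ [st.2.1] else st.1), 0, true)
      else
        (st.1, st.2.1 + 1, st.2.2))
    ([], 0, false)).1

-- ===== PORT B =====
def blank_runs_from_lines_alt (lines : List String) : List Int :=
  let idx : List Int := (PySem.List.enumerate lines 0).filterMap
    (fun p => if PySem.Str.strip p.2 ≠ "" then some p.1 else none)
  (idx.zip (PySem.List.slice idx (some 1) none)).foldl
    (fun runs p => if p.2 - p.1 - 1 > 0 then runs ++ [p.2 - p.1 - 1] else runs) []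

-- ===== PRECONDITION & SPEC =====
def Spec_blank_runs_from_lines (lines : List String) (out : List Int) : Prop := out = blank_runs_from_lines_alt lines
instance (lines : List String) (out : List Int) : Decidable (Spec_blank_runs_from_lines lines out) := by unfold Spec_blank_runs_from_lines; infer_instance

-- ===== CLAIM (what is proved, stated in full; the proofs are below) =====
def Claim_equal_blank_runs_from_lines : Prop := ∀ (lines : List String), Dom_blank_runs_from_lines lines → Spec_blank_runs_from_lines lines (blank_runs_from_lines lines)

-- ===== LEMMAS AND PROOFS =====

-- reference: gap lengths after a non-blank line has been seen, c blanks pending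
def pvGapsAux (c : Int) : List String → List Int
  | [] => []
  | l :: rest =>
      if PySem.Str.strip l ≠ "" then (if c > 0 then [c] else []) ++ pvGapsAux 0 rest
      else pvGapsAux (c + 1) rest

-- reference: gap lengths of a whole file (leading blanks skipped)
def pvGaps : List String → List Int
  | [] => []
  | l :: rest => if PySem.Str.strip l ≠ "" then pvGapsAux 0 rest else pvGaps rest

def pvStepA (st : List Int × Int × Bool) (line : String) : List Int × Int × Bool :=
  if PySem.Str.strip line ≠ "" then
    ((if st.2.2 = true ∧ st.2.1 > 0 then st.1 ++ [st.2.1] else st.1), 0, true)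
  else (st.1, st.2.1 + 1, st.2.2)

def pvStepB (runs : List Int) (p : Int × Int) : List Int :=
  if p.2 - p.1 - 1 > 0 then runs ++ [p.2 - p.1 - 1] else runs

def pvIdx (k : Int) (ls : List String) : List Int :=
  (PySem.List.enumerate ls k).filterMap
    (fun p => if PySem.Str.strip p.2 ≠ "" then some p.1 else none)

def pvPairs (idx : List Int) : List Int :=
  (idx.zip idx.tail).foldl pvStepB []

theorem pvIdx_nil (k : Int) : pvIdx k [] = [] := rfl

theorem pvIdx_cons (k : Int) (l : String) (rest : List String) :
    pvIdx k (l :: rest) =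
      if PySem.Str.strip l ≠ "" then k :: pvIdx (k + 1) rest else pvIdx (k + 1) rest := by
  simp only [pvIdx, PySem.List.enumerate_cons, List.filterMap_cons]
  split_ifs <;> rfl

theorem pvStepB_acc (l : List (Int × Int)) (acc : List Int) :
    l.foldl pvStepB acc = acc ++ l.foldl pvStepB [] := by
  induction l generalizing acc with
  | nil => simp
  | cons p rest ih =>
      simp only [List.foldl_cons]
      rw [ih, ih (pvStepB [] p)]
      simp [pvStepB]
      split_ifs <;> simp

theorem pvPairs_cons (ls : List String) (k p : Int) :
    pvPairs (p :: pvIdx k ls) = pvGapsAux (k - p - 1) ls := by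
  induction ls generalizing k p with
  | nil => simp [pvIdx_nil, pvPairs, pvGapsAux]
  | cons l rest ih =>
      rw [pvIdx_cons]
      by_cases h : PySem.Str.strip l ≠ ""
      · simp only [if_pos h]
        have : pvPairs (p :: k :: pvIdx (k + 1) rest) =
            pvStepB [] (p, k) ++ pvPairs (k :: pvIdx (k + 1) rest) := by
          simp only [pvPairs, List.tail_cons, List.zip_cons_cons, List.foldl_cons]
          rw [pvStepB_acc]
        rw [this, ih, pvGapsAux, if_pos h]
        have h1 : k + 1 - k - 1 = (0 : Int) := by ring
        have h2 : pvStepB [] (p, k) = if k - p - 1 > 0 then [k - p - 1] else [] := by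
          simp [pvStepB]
        rw [h1, h2]
      · simp only [if_neg h]
        rw [ih]
        rw [pvGapsAux, if_neg h]
        congr 1
        ring

theorem pvPairs_idx (ls : List String) (k : Int) :
    pvPairs (pvIdx k ls) = pvGaps ls := by
  induction ls generalizing k with
  | nil => simp [pvIdx_nil, pvPairs, pvGaps]
  | cons l rest ih =>
      rw [pvIdx_cons]
      by_cases h : PySem.Str.strip l ≠ ""
      · simp only [if_pos h]
        rw [pvPairs_cons, pvGaps, if_pos h]
        congr 1
        ring
      · simp only [if_neg h]
        rw [ih, pvGaps, if_neg h]

theorem pvFoldA_seen (ls : List String) (runs : List Int) (c : Int) :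
    (ls.foldl pvStepA (runs, c, true)).1 = runs ++ pvGapsAux c ls := by
  induction ls generalizing runs c with
  | nil => simp [pvGapsAux]
  | cons l rest ih =>
      simp only [List.foldl_cons, pvStepA]
      by_cases h : PySem.Str.strip l ≠ ""
      · simp only [if_pos h]
        rw [pvGapsAux, if_pos h, ih]
        split_ifs with h1 h2 <;> simp_all [List.append_assoc]
      · simp only [if_neg h]
        rw [ih, pvGapsAux, if_neg h]

theorem pvFoldA_unseen (ls : List String) (c : Int) :
    (ls.foldl pvStepA ([], c, false)).1 = pvGaps ls := by
  induction ls generalizing c with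
  | nil => simp [pvGaps]
  | cons l rest ih =>
      simp only [List.foldl_cons, pvStepA]
      by_cases h : PySem.Str.strip l ≠ ""
      · have hb : ¬ ((false : Bool) = true ∧ c > 0) := by simp
        simp only [if_pos h, if_neg hb]
        rw [pvFoldA_seen, pvGaps, if_pos h]
        simp
      · simp only [if_neg h]
        rw [ih, pvGaps, if_neg h]

theorem pvA_eq_gaps (lines : List String) : blank_runs_from_lines lines = pvGaps lines := by
  have : blank_runs_from_lines lines = (lines.foldl pvStepA ([], 0, false)).1 := rfl
  rw [this, pvFoldA_unseen]

theorem pvB_eq_gaps (lines : List String) : blank_runs_from_lines_alt lines = pvGaps lines := by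
  have : blank_runs_from_lines_alt lines = pvPairs (pvIdx 0 lines) := by
    simp only [blank_runs_from_lines_alt, pvPairs, pvIdx,
      PySem.List.slice_from_one]
    rfl
  rw [this, pvPairs_idx]

-- ===== VERDICT (by name: the statement is the Claim_ definition above) =====
theorem blank_runs_from_lines_spec : Claim_equal_blank_runs_from_lines := by
  intro lines _
  unfold Spec_blank_runs_from_lines
  rw [pvA_eq_gaps, pvB_eq_gaps]
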